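-- pv_equiv track=rewrite | github.com/botassembly/jn | src/jn/filtering.py | separate_config_and_filters
-- ===== SOURCE A (Python) =====
-- from typing import Dict, List, Tuple
--
-- def parse_operator(param_name: str) -> Tuple[str, str]:
--     """Parse operator from parameter name.
--
--     Supports:
--     - field=value → (field, "==")
--     - field>value → (field, ">")
--     - field<value → (field, "<")
--     - field>=value → (field, ">=")
--     - field<=value → (field, "<=")
--     - field!=value → (field, "!=")
--
--     Args:
--         param_name: Parameter name potentially with operator
--
--     Returns:
--         Tuple of (field_name, operator)
--
--     Examples:
--         >>> parse_operator("revenue>1000")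
--         ("revenue", ">")
--         >>> parse_operator("category")
--         ("category", "==")
--     """
--     # Check for two-char operators first
--     if ">=" in param_name:
--         field, _ = param_name.split(">=", 1)
--         return field, ">="
--     elif "<=" in param_name:
--         field, _ = param_name.split("<=", 1)
--         return field, "<="
--     elif "!=" in param_name:
--         field, _ = param_name.split("!=", 1)
--         return field, "!="
--     # Then single-char operators
--     elif ">" in param_name:
--         field, _ = param_name.split(">", 1)
--         return field, ">"
--     elif "<" in param_name:
--         field, _ = param_name.split("<", 1)
--         return field, "<"
--     else:
--         # No operator, default to equality
--         return param_name, "=="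
--
-- def parse_filter_params(params: Dict[str, str]) -> List[Tuple[str, str, str]]:
--     """Parse filter parameters into (field, operator, value) tuples.
--
--     Args:
--         params: Dictionary of parameter name to value
--
--     Returns:
--         List of (field, operator, value) tuples
--
--     Examples:
--         >>> parse_filter_params({"revenue>": "1000", "category": "Electronics"})
--         [("revenue", ">", "1000"), ("category", "==", "Electronics")]
--     """
--     filters = []
--     for param_name, value in params.items():
--         field, operator = parse_operator(param_name)
--         filters.append((field, operator, value))
--     return filters
--
-- def separate_config_and_filters(
--     params: Dict[str, str], config_param_names: List[str]
-- ) -> Tuple[Dict[str, str], List[Tuple[str, str, str]]]: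
--     """Separate query parameters into config and filter groups.
--
--     Args:
--         params: All query parameters
--         config_param_names: List of parameter names that are config (from introspection)
--
--     Returns:
--         Tuple of (config_dict, filter_list)
--
--     Examples:
--         >>> separate_config_and_filters(
--         ...     {"method": "POST", "gene": "BRAF", "limit": "100"},
--         ...     ["method", "limit"]
--         ... )
--         ({"method": "POST", "limit": "100"}, [("gene", "==", "BRAF")])
--     """
--     config = {}
--     filter_params = {}
--
--     for param_name, value in params.items():
--         # Extract base field name (without operator)
--         field, _ = parse_operator(param_name)
--
--         if field in config_param_names:
--             # This is a config parameter
--             config[field] = value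
--         else:
--             # This is a filter parameter
--             filter_params[param_name] = value
--
--     filters = parse_filter_params(filter_params)
--     return config, filters
-- ===== SOURCE B (Python) =====
-- from typing import Dict, List, Tuple
--
-- def parse_operator(param_name: str) -> Tuple[str, str]:
--     if ">=" in param_name:
--         field, _ = param_name.split(">=", 1)
--         return field, ">="
--     elif "<=" in param_name:
--         field, _ = param_name.split("<=", 1)
--         return field, "<="
--     elif "!=" in param_name:
--         field, _ = param_name.split("!=", 1)
--         return field, "!="
--     elif ">" in param_name:
--         field, _ = param_name.split(">", 1)
--         return field, ">"
--     elif "<" in param_name: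
--         field, _ = param_name.split("<", 1)
--         return field, "<"
--     else:
--         return param_name, "=="
--
-- def separate_config_and_filters(params, config_param_names):
--     """Single fused pass: classify each param and emit the filter triple
--     immediately, instead of staging filters in an intermediate dict that
--     is re-scanned and re-parsed afterwards."""
--     config = {}
--     filters = []
--     for param_name, value in params.items():
--         field, operator = parse_operator(param_name)
--         if field in config_param_names:
--             config[field] = value
--         else:
--             filters.append((field, operator, value))
--     return config, filters
-- ===== Notes on version B (the rewrite author's own statement) =====
-- stated objective: simpler
-- what changed: B classifies and parses each parameter in one fused pass, emitting filter triples directly, instead of A's staging of filter params in an intermediate dict that is then re-scanned and each key re-parsed by parse_filter_params.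
import Mathlib
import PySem

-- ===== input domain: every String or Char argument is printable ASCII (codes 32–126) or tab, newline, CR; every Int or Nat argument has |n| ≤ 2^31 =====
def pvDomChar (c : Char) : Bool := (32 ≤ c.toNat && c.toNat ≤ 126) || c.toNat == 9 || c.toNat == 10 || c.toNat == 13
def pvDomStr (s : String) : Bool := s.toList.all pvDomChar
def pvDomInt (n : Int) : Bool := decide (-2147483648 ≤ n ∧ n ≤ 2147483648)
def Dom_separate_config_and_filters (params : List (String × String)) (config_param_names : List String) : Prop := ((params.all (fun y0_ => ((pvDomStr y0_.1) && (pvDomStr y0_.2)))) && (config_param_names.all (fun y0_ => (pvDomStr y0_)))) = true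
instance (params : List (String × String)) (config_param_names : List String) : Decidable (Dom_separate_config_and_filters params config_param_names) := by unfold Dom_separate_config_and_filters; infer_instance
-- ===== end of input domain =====

-- ===== PORT A =====
-- One fused pass (B) vs A's intermediate filter dict + second parsing pass; proved equal when params' keys are distinct (always true for a Python dict).

-- helper shared by both Pythons: parse_operator (B's Source B keeps A's parse_operator verbatim)
def pvSplitHead (s sep : String) : String :=
  match PySem.Str.splitMax? s sep 1 with
  | some (f :: _) => f
  | _ => s   -- unreachable: sep is a nonempty literal at every call site

def parse_operator (param_name : String) : String × String :=
  if PySem.Str.isIn ">=" param_name then (pvSplitHead param_name ">=", ">=")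
  else if PySem.Str.isIn "<=" param_name then (pvSplitHead param_name "<=", "<=")
  else if PySem.Str.isIn "!=" param_name then (pvSplitHead param_name "!=", "!=")
  else if PySem.Str.isIn ">" param_name then (pvSplitHead param_name ">", ">")
  else if PySem.Str.isIn "<" param_name then (pvSplitHead param_name "<", "<")
  else (param_name, "==")

def parse_filter_params (params : PySem.Dict String String) : List (String × String × String) :=
  params.items.foldl
    (fun filters pv => filters ++ [((parse_operator pv.1).1, (parse_operator pv.1).2, pv.2)]) []

def separate_config_and_filters (params : List (String × String)) (config_param_names : List String) : (List (String × String)) × (List (String × String × String)) :=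
  let st := params.foldl
    (fun (st : PySem.Dict String String × PySem.Dict String String) pv =>
      if (parse_operator pv.1).1 ∈ config_param_names then
        (st.1.insert (parse_operator pv.1).1 pv.2, st.2)
      else
        (st.1, st.2.insert pv.1 pv.2))
    (PySem.Dict.empty, PySem.Dict.empty)
  (st.1.items, parse_filter_params st.2)

-- ===== PORT B =====
def separate_config_and_filters_alt (params : List (String × String)) (config_param_names : List String) : (List (String × String)) × (List (String × String × String)) :=
  let st := params.foldl
    (fun (st : PySem.Dict String String × List (String × String × String)) pv =>
      let fo := parse_operator pv.1
      if fo.1 ∈ config_param_names then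
        (st.1.insert fo.1 pv.2, st.2)
      else
        (st.1, st.2 ++ [(fo.1, fo.2, pv.2)]))
    (PySem.Dict.empty, [])
  (st.1.items, st.2)

-- ===== PRECONDITION & SPEC =====
-- Pre_ excludes association lists with duplicate parameter keys: params is a Python dict, whose keys are necessarily distinct.
def Pre_separate_config_and_filters (params : List (String × String)) (config_param_names : List String) : Prop :=
  (params.map Prod.fst).Nodup
instance (params : List (String × String)) (config_param_names : List String) : Decidable (Pre_separate_config_and_filters params config_param_names) := by unfold Pre_separate_config_and_filters; infer_instance

def pvWitness_separate_config_and_filters : (List (String × String)) × List String :=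
  ([("method", "POST"), ("gene", "BRAF"), ("rev>=", "5")], ["method"])

def Spec_separate_config_and_filters (params : List (String × String)) (config_param_names : List String) (out : (List (String × String)) × (List (String × String × String))) : Prop := out = separate_config_and_filters_alt params config_param_names
instance (params : List (String × String)) (config_param_names : List String) (out : (List (String × String)) × (List (String × String × String))) : Decidable (Spec_separate_config_and_filters params config_param_names out) := by unfold Spec_separate_config_and_filters; infer_instance

-- ===== CLAIM (what is proved, stated in full; the proofs are below) =====
def Claim_equal_separate_config_and_filters : Prop := ∀ (params : List (String × String)) (config_param_names : List String), Dom_separate_config_and_filters params config_param_names → Pre_separate_config_and_filters params config_param_names → Spec_separate_config_and_filters params config_param_names (separate_config_and_filters params config_param_names)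

-- ===== LEMMAS AND PROOFS =====

-- the triple B emits for one staged filter entry
def pvTri (pv : String × String) : String × String × String :=
  ((parse_operator pv.1).1, (parse_operator pv.1).2, pv.2)

theorem parse_filter_params_eq_map (d : PySem.Dict String String) :
    parse_filter_params d = d.items.map pvTri := by
  show d.items.foldl (fun acc pv => acc ++ [pvTri pv]) [] = _
  rw [PySem.List.foldl_append_singleton_eq_map]
  simp

-- loop invariant: A's fold from (c, fp) and B's fold from (c, fp.items.map pvTri)
-- stay in lockstep, provided the remaining params' keys are fresh for fp and distinct.
theorem fold_agree (config_param_names : List String) :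
    ∀ (params : List (String × String)) (c fp : PySem.Dict String String),
    (params.map Prod.fst).Nodup →
    (∀ p ∈ params, fp.contains p.1 = false) →
    (params.foldl
      (fun (st : PySem.Dict String String × PySem.Dict String String) pv =>
        if (parse_operator pv.1).1 ∈ config_param_names then
          (st.1.insert (parse_operator pv.1).1 pv.2, st.2)
        else
          (st.1, st.2.insert pv.1 pv.2)) (c, fp)).1 =
      (params.foldl
        (fun (st : PySem.Dict String String × List (String × String × String)) pv =>
          let fo := parse_operator pv.1
          if fo.1 ∈ config_param_names then (st.1.insert fo.1 pv.2, st.2)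
          else (st.1, st.2 ++ [(fo.1, fo.2, pv.2)])) (c, fp.items.map pvTri)).1 ∧
    (params.foldl
      (fun (st : PySem.Dict String String × PySem.Dict String String) pv =>
        if (parse_operator pv.1).1 ∈ config_param_names then
          (st.1.insert (parse_operator pv.1).1 pv.2, st.2)
        else
          (st.1, st.2.insert pv.1 pv.2)) (c, fp)).2.items.map pvTri =
      (params.foldl
        (fun (st : PySem.Dict String String × List (String × String × String)) pv =>
          let fo := parse_operator pv.1
          if fo.1 ∈ config_param_names then (st.1.insert fo.1 pv.2, st.2)
          else (st.1, st.2 ++ [(fo.1, fo.2, pv.2)])) (c, fp.items.map pvTri)).2 := by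
  intro params
  induction params with
  | nil => intro c fp _ _; exact ⟨rfl, rfl⟩
  | cons p rest ih =>
    intro c fp hnd hfresh
    simp only [List.map_cons, List.nodup_cons] at hnd
    by_cases hc : (parse_operator p.1).1 ∈ config_param_names
    · simp only [List.foldl_cons, if_pos hc]
      exact ih (c.insert (parse_operator p.1).1 p.2) fp hnd.2
        (fun q hq => hfresh q (List.mem_cons_of_mem _ hq))
    · simp only [List.foldl_cons, if_neg hc]
      have hitems : (fp.insert p.1 p.2).items = fp.items ++ [(p.1, p.2)] :=
        PySem.Dict.items_insert_of_not_contains fp p.2 (hfresh p (List.mem_cons_self ..))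
      have hmap : (fp.insert p.1 p.2).items.map pvTri = fp.items.map pvTri ++ [pvTri (p.1, p.2)] := by
        simp [hitems]
      have hfresh' : ∀ q ∈ rest, (fp.insert p.1 p.2).contains q.1 = false := by
        intro q hq
        rw [PySem.Dict.contains_insert]
        have hne : q.1 ≠ p.1 := by
          intro h
          exact hnd.1 (h ▸ List.mem_map_of_mem hq)
        simp [hne, hfresh q (List.mem_cons_of_mem _ hq)]
      have := ih (c) (fp.insert p.1 p.2) hnd.2 hfresh'
      rw [hmap] at this
      exact this

theorem separate_config_and_filters_spec : Claim_equal_separate_config_and_filters := by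
  intro params config_param_names _ hpre
  unfold Spec_separate_config_and_filters
  have h := fold_agree config_param_names params PySem.Dict.empty PySem.Dict.empty hpre
    (fun p _ => PySem.Dict.contains_empty _)
  have hemp : (PySem.Dict.empty : PySem.Dict String String).items = [] := by
    simp [PySem.Dict.empty]
  rw [hemp, List.map_nil] at h
  exact Prod.ext (congrArg PySem.Dict.items h.1)
    ((parse_filter_params_eq_map _).trans h.2)
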